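-- pv_equiv track=rewrite | github.com/arekfu/t4-geom-convert | t4_geom_convert/Kernel/Volume/CCellConversion.py | conversionEQUA
-- ===== SOURCE A (Python) =====
-- def conversionEQUA(list_surface):
--     '''Method converting a list of if of surface and return a tuple with
--     the informations of the volume EQUA T4'''
--
--     minus_surfs = []
--     plus_surfs = []
--     seen = set()
--     for elt in list_surface:
--         assert isinstance(elt, int)
--         if elt in seen:
--             # do not emit the same surface twice
--             continue
--         seen.add(elt)
--         if elt < 0:
--             minus_surfs.append(-elt)
--         elif elt > 0:
--             plus_surfs.append(elt)
--     return plus_surfs, minus_surfs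
-- ===== SOURCE B (Python) =====
-- def conversionEQUA(list_surface):
--     '''Method converting a list of if of surface and return a tuple with
--     the informations of the volume EQUA T4'''
--     assert all(isinstance(elt, int) for elt in list_surface)
--     unique = list(dict.fromkeys(list_surface))
--     plus_surfs = [elt for elt in unique if elt > 0]
--     minus_surfs = [-elt for elt in unique if elt < 0]
--     return plus_surfs, minus_surfs
-- ===== Notes on version B (the rewrite author's own statement) =====
-- stated objective: simpler
-- what changed: Replaces the single fused assert/dedup/classify loop with an up-front type check, an order-preserving dedup via dict.fromkeys, and two independent filter comprehensions for the plus and minus lists.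
import Mathlib
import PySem

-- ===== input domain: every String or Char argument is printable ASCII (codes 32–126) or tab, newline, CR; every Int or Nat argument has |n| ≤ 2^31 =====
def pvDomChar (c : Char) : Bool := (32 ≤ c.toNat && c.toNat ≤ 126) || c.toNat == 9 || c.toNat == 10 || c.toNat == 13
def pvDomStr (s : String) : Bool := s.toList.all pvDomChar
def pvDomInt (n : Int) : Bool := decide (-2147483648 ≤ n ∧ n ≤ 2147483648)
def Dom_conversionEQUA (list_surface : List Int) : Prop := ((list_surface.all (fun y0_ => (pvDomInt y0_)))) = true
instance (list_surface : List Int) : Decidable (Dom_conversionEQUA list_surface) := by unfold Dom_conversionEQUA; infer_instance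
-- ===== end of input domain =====

-- B replaces A's fused dedup-and-classify loop by dedup (dict.fromkeys) followed by two filter passes; same cost, simpler.

-- ===== PORT A =====
-- state: (minus_surfs, plus_surfs, seen)
def conversionEQUA_step (st : List Int × List Int × PySem.Set Int) (elt : Int) :
    List Int × List Int × PySem.Set Int :=
  let (minus_surfs, plus_surfs, seen) := st
  if PySem.Set.contains seen elt then (minus_surfs, plus_surfs, seen)
  else
    let seen := PySem.Set.add seen elt
    if elt < 0 then (minus_surfs ++ [-elt], plus_surfs, seen)
    else if elt > 0 then (minus_surfs, plus_surfs ++ [elt], seen)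
    else (minus_surfs, plus_surfs, seen)

def conversionEQUA (list_surface : List Int) : List Int × List Int :=
  let st := list_surface.foldl conversionEQUA_step ([], [], PySem.Set.empty)
  (st.2.1, st.1)

-- ===== PORT B =====
def conversionEQUA_alt (list_surface : List Int) : List Int × List Int :=
  let unique := PySem.List.dedup list_surface
  (unique.filter (fun elt => elt > 0), (unique.filter (fun elt => elt < 0)).map (fun elt => -elt))

-- ===== PRECONDITION & SPEC =====
def Spec_conversionEQUA (list_surface : List Int) (out : List Int × List Int) : Prop := out = conversionEQUA_alt list_surface
instance (list_surface : List Int) (out : List Int × List Int) : Decidable (Spec_conversionEQUA list_surface out) := by unfold Spec_conversionEQUA; infer_instance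

-- ===== CLAIM (what is proved, stated in full; the proofs are below) =====
def Claim_equal_conversionEQUA : Prop := ∀ (list_surface : List Int), Dom_conversionEQUA list_surface → Spec_conversionEQUA list_surface (conversionEQUA list_surface)

-- ===== LEMMAS AND PROOFS =====

-- the suffix of the dedup produced after the elements of `s` have already been seen
def dedupFrom (s : PySem.Set Int) : List Int → List Int
  | [] => []
  | x :: xs => if PySem.Set.contains s x then dedupFrom s xs
               else x :: dedupFrom (PySem.Set.add s x) xs

theorem foldl_add_eq_dedupFrom (xs : List Int) (s : PySem.Set Int) :
    xs.foldl PySem.Set.add s = s ++ dedupFrom s xs := by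
  induction xs generalizing s with
  | nil => simp [dedupFrom]
  | cons x xs ih =>
    simp only [List.foldl_cons, dedupFrom]
    by_cases h : PySem.Set.contains s x
    · rw [show PySem.Set.add s x = s from by simp only [PySem.Set.add]; rw [if_pos h],
        ih, if_pos h]
    · rw [show PySem.Set.add s x = s ++ [x] from by simp only [PySem.Set.add]; rw [if_neg h],
        ih, if_neg h, List.append_assoc]
      rfl

theorem dedup_eq_dedupFrom (xs : List Int) :
    PySem.List.dedup xs = dedupFrom PySem.Set.empty xs := by
  have := foldl_add_eq_dedupFrom xs PySem.Set.empty
  simpa [PySem.List.dedup_eq_ofList, PySem.Set.ofList_eq_foldl, PySem.Set.empty] using this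

theorem foldl_step_eq (xs : List Int) :
    ∀ (s : PySem.Set Int) (m p : List Int),
      (xs.foldl conversionEQUA_step (m, p, s)).1
        = m ++ ((dedupFrom s xs).filter (fun e => e < 0)).map (fun e => -e) ∧
      (xs.foldl conversionEQUA_step (m, p, s)).2.1
        = p ++ (dedupFrom s xs).filter (fun e => e > 0) := by
  induction xs with
  | nil => intro s m p; simp [dedupFrom]
  | cons x xs ih =>
    intro s m p
    simp only [List.foldl_cons, conversionEQUA_step, dedupFrom]
    by_cases h : PySem.Set.contains s x
    · simp only [if_pos h]
      exact ih s m p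
    · simp only [if_neg h]
      rcases lt_trichotomy x 0 with hx | hx | hx
      · simp only [if_pos hx, List.filter_cons]
        rcases ih (PySem.Set.add s x) (m ++ [-x]) p with ⟨h1, h2⟩
        refine ⟨?_, ?_⟩
        · rw [h1]
          simp [hx, List.append_assoc]
        · rw [h2]
          simp [show ¬ (x > 0) from by omega]
      · subst hx
        simp only [lt_irrefl, if_false, gt_iff_lt]
        rcases ih (PySem.Set.add s 0) m p with ⟨h1, h2⟩
        refine ⟨?_, ?_⟩
        · rw [h1]; simp
        · rw [h2]; simp
      · simp only [if_neg (by omega : ¬ x < 0), if_pos (by omega : x > 0)]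
        rcases ih (PySem.Set.add s x) m (p ++ [x]) with ⟨h1, h2⟩
        refine ⟨?_, ?_⟩
        · rw [h1]
          simp [show ¬ (x < 0) from by omega]
        · rw [h2]
          simp [hx, List.append_assoc]

-- ===== VERDICT (by name: the statement is the Claim_ definition above) =====
theorem conversionEQUA_spec : Claim_equal_conversionEQUA := by
  intro xs _
  unfold Spec_conversionEQUA conversionEQUA conversionEQUA_alt
  rcases foldl_step_eq xs PySem.Set.empty [] [] with ⟨h1, h2⟩
  rw [dedup_eq_dedupFrom]
  simp only [h1, h2, List.nil_append]
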